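-- pv_equiv track=rewrite | github.com/Luksanss/ZPR_2024-2025 | sjezdovkaPathFinding.py | findLongestPathJump
-- ===== SOURCE A (Python) =====
-- def findLongestPathJump(path):
--     numOfPaths = 1
--     pathNow = 0
--     Max = 0
--     tempMax = 0
--
--     pathFindingIndexes = []
--
--     for _ in range(len(path)):
--         pathFindingIndexes.append(0)
--
--     for i in path:
--         numOfPaths *= len(i)
--
--     while pathNow != numOfPaths:
--         for index, i in enumerate(path):
--             tempMax += i[pathFindingIndexes[index]]
--         if tempMax > Max:
--             Max = tempMax
--
--         # reset tempMax and add one searched path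
--         tempMax = 0
--         pathNow += 1
--
--         # increase indexes
--
--         startIncreaseOnIndex = len(pathFindingIndexes) - 1
--
--         while True:
--             try:
--                 path[startIncreaseOnIndex][pathFindingIndexes[startIncreaseOnIndex] + 1]
--                 pathFindingIndexes[startIncreaseOnIndex] += 1
--                 break
--             except:
--                 pathFindingIndexes[startIncreaseOnIndex] = 0
--                 startIncreaseOnIndex -= 1
--                 if (startIncreaseOnIndex == -1):
--                     return(Max)
-- ===== SOURCE B (Python) =====
-- def findLongestPathJump(path):
--     best = sum(max(row) for row in path)
--     return best if best > 0 else 0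
-- ===== Notes on version B (the rewrite author's own statement) =====
-- stated objective: faster
-- what changed: Replaces the exhaustive mixed-radix enumeration of every index combination with a single pass summing each sublist's maximum (the choices are independent), clamped at 0 like A's initial Max.
-- outside the precondition, e.g. on findLongestPathJump([[]]): A returns None, B raises ValueError; on findLongestPathJump([]): A raises IndexError, B returns 0
import Mathlib
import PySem

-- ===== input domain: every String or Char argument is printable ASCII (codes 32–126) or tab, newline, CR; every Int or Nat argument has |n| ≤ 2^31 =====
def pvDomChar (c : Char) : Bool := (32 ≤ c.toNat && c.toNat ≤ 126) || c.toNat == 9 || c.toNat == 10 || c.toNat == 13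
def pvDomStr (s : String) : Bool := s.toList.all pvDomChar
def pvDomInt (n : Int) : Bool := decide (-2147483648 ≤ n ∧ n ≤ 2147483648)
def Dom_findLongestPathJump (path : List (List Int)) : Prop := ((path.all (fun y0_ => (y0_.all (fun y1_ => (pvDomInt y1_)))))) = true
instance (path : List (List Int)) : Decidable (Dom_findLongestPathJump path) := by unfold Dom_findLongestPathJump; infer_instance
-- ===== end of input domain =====

-- B replaces A's exhaustive enumeration of every index combination by one pass summing each
-- sublist's maximum (choices are independent), clamped below at 0 like A's initial Max = 0.


-- ===== PORT A =====
-- 'for i in path: numOfPaths *= len(i)'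
def pvProdLens (path : List (List Int)) : Nat := path.foldl (fun n i => n * i.length) 1

-- 'for index, i in enumerate(path): tempMax += i[pathFindingIndexes[index]]'
-- (both indexings are in range on every state the loop reaches, so the total pyGetD is exact there)
def pvTempMax (path : List (List Int)) (idxs : List Int) : Int :=
  (PySem.List.enumerate path 0).foldl
    (fun t p => t + PySem.List.pyGetD p.2 (PySem.List.pyGetD idxs p.1 0) 0) 0

-- the inner 'while True' carry loop; k-1 is startIncreaseOnIndex, k = 0 is the
-- 'startIncreaseOnIndex == -1' exit; the try-probe path[k-1][idxs[k-1]+1] is pyGet?.isSome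
def pvCarry (path : List (List Int)) (idxs : List Int) (k : Nat) : Option (List Int) :=
  match k with
  | 0 => none
  | k+1 =>
      let row := PySem.List.pyGetD path (k : Int) []
      let j := PySem.List.pyGetD idxs (k : Int) 0
      if (PySem.List.pyGet? row (j + 1)).isSome then some (PySem.List.pySetD idxs (k : Int) (j + 1))
      else pvCarry path (PySem.List.pySetD idxs (k : Int) 0) k

-- the outer 'while pathNow != numOfPaths' loop; fuel = numOfPaths - pathNow
def pvALoop (path : List (List Int)) (fuel : Nat) (idxs : List Int) (mx : Int) : Int :=
  match fuel with
  | 0 => mx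
  | fuel+1 =>
      let tempMax := pvTempMax path idxs
      let mx' := if tempMax > mx then tempMax else mx
      match pvCarry path idxs path.length with
      | some idxs' => pvALoop path fuel idxs' mx'
      | none => mx'

def findLongestPathJump (path : List (List Int)) : Int :=
  pvALoop path (pvProdLens path) (List.replicate path.length 0) 0

-- ===== PORT B =====
-- max(row) of a nonempty row (Python's max raises on []; [] is outside Pre_)
def pvRowMax (row : List Int) : Int :=
  match row with
  | [] => 0
  | x :: xs => xs.foldl max x

def findLongestPathJump_alt (path : List (List Int)) : Int :=
  let best := path.foldl (fun s row => s + pvRowMax row) 0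
  if best > 0 then best else 0

-- ===== PRECONDITION & SPEC =====
-- Pre_ excludes path == [] (A raises IndexError in its except handler) and any empty sublist
-- (A then falls off the end returning None, not an int; B raises ValueError from max([])).
def Pre_findLongestPathJump (path : List (List Int)) : Prop :=
  path ≠ [] ∧ ∀ row ∈ path, row ≠ []
instance (path : List (List Int)) : Decidable (Pre_findLongestPathJump path) := by
  unfold Pre_findLongestPathJump; infer_instance

def pvWitness_findLongestPathJump : List (List Int) := [[1, -2], [3]]

def Spec_findLongestPathJump (path : List (List Int)) (out : Int) : Prop := out = findLongestPathJump_alt path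
instance (path : List (List Int)) (out : Int) : Decidable (Spec_findLongestPathJump path out) := by unfold Spec_findLongestPathJump; infer_instance

-- ===== CLAIM (what is proved, stated in full; the proofs are below) =====
def Claim_equal_findLongestPathJump : Prop := ∀ (path : List (List Int)), Dom_findLongestPathJump path → Pre_findLongestPathJump path → Spec_findLongestPathJump path (findLongestPathJump path)

-- ===== LEMMAS AND PROOFS =====

-- B's accumulated sum of per-row maxima, as a closed function
def pvS (path : List (List Int)) : Int := path.foldl (fun s row => s + pvRowMax row) 0

-- the index tuple is componentwise in range
def pvValid : List (List Int) → List Int → Prop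
  | [], [] => True
  | r :: rest, j :: ri => 0 ≤ j ∧ j.toNat < r.length ∧ pvValid rest ri
  | _, _ => False

-- the sum A's inner for-loop accumulates at the tuple idxs
def pvSumAt : List (List Int) → List Int → Int
  | r :: rest, j :: ri => r.getD j.toNat 0 + pvSumAt rest ri
  | _, _ => 0

-- best sum over all valid tuples lexicographically ≥ the current one
def pvG : List (List Int) → List Int → Int
  | r :: rest, j :: ri =>
      (r.drop (j.toNat + 1)).foldl (fun a x => max a (x + pvS rest)) (r.getD j.toNat 0 + pvG rest ri)
  | _, _ => 0

-- number of tuples still to be visited (including the current one)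
def pvCount : List (List Int) → List Int → Nat
  | r :: rest, j :: ri => pvCount rest ri + (r.length - 1 - j.toNat) * pvProdLens rest
  | _, _ => 1

-- the prefix-zeroing a failing carry chain performs
def pvZ : List Int → Nat → List Int
  | ri, 0 => ri
  | ri, k+1 => pvZ (ri.set k 0) k

theorem pvProdLens_go (path : List (List Int)) (a : Nat) :
    path.foldl (fun n i => n * i.length) a = a * pvProdLens path := by
  induction path generalizing a with
  | nil => simp [pvProdLens]
  | cons r rest ih =>
      simp only [pvProdLens, List.foldl_cons, Nat.one_mul] at *
      rw [ih, ih r.length, Nat.mul_assoc]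

theorem pvProdLens_cons (r : List Int) (rest : List (List Int)) :
    pvProdLens (r :: rest) = r.length * pvProdLens rest := by
  simp only [pvProdLens, List.foldl_cons, Nat.one_mul]
  exact pvProdLens_go rest r.length

theorem pvS_cons (r : List Int) (rest : List (List Int)) :
    pvS (r :: rest) = pvRowMax r + pvS rest := by
  simp [pvS, PySem.List.foldl_add]

theorem pvFoldlMax_init (f : Int → Int) (l : List Int) (b c : Int) :
    l.foldl (fun a x => max a (f x)) (max b c) = max b (l.foldl (fun a x => max a (f x)) c) := by
  induction l generalizing c with
  | nil => rfl
  | cons y t ih => simp only [List.foldl_cons, max_assoc]; exact ih _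

theorem pvRowMax_shift (xs : List Int) (x c : Int) :
    xs.foldl (fun a y => max a (y + c)) (x + c) = xs.foldl max x + c := by
  induction xs generalizing x with
  | nil => rfl
  | cons y t ih => simp only [List.foldl_cons, max_add_add_right]; exact ih _

theorem pvValid_length {path : List (List Int)} {idxs : List Int} (h : pvValid path idxs) :
    idxs.length = path.length := by
  induction path generalizing idxs with
  | nil => cases idxs with
    | nil => rfl
    | cons j ri => exact h.elim
  | cons r rest ih =>
      cases idxs with
      | nil => exact h.elim
      | cons j ri => simpa using ih h.2.2

theorem pvCount_pos (path : List (List Int)) (idxs : List Int) : 1 ≤ pvCount path idxs := by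
  cases path with
  | nil => exact le_refl 1
  | cons r rest =>
      cases idxs with
      | nil => exact le_refl 1
      | cons j ri => exact Nat.le_trans (pvCount_pos rest ri) (Nat.le_add_right _ _)

theorem pvZ_eq (ri : List Int) (k : Nat) (h : k ≤ ri.length) :
    pvZ ri k = List.replicate k 0 ++ ri.drop k := by
  induction k generalizing ri with
  | zero => simp [pvZ]
  | succ k ih =>
      have hk : k < ri.length := h
      rw [pvZ, ih _ (by simpa using Nat.le_of_succ_le h)]
      rw [List.drop_set, if_neg (by omega), List.drop_eq_getElem_cons hk]
      simp only [Nat.sub_self, List.set_cons_zero]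
      rw [List.replicate_succ', List.append_assoc]
      rfl

theorem pvValid_zeros (path : List (List Int)) (hne : ∀ r ∈ path, r ≠ []) :
    pvValid path (List.replicate path.length 0) := by
  induction path with
  | nil => trivial
  | cons r rest ih =>
      refine ⟨le_refl 0, ?_, ih (fun x hx => hne x (List.mem_cons_of_mem _ hx))⟩
      have := hne r List.mem_cons_self
      cases r with
      | nil => exact absurd rfl this
      | cons a l => simp

theorem pvCount_zeros (path : List (List Int)) (hne : ∀ r ∈ path, r ≠ []) :
    pvCount path (List.replicate path.length 0) = pvProdLens path := by
  induction path with
  | nil => rfl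
  | cons r rest ih =>
      have h1 : 1 ≤ r.length := by
        have := hne r List.mem_cons_self
        cases r with
        | nil => exact absurd rfl this
        | cons a l => simp
      simp only [List.length_cons, List.replicate_succ, pvCount, pvProdLens_cons,
        ih (fun x hx => hne x (List.mem_cons_of_mem _ hx)), Int.toNat_zero]
      have hr : r.length = (r.length - 1) + 1 := by omega
      rw [hr]
      simp [Nat.add_mul]
      omega

theorem pvG_zeros (path : List (List Int)) (hne : ∀ r ∈ path, r ≠ []) :
    pvG path (List.replicate path.length 0) = pvS path := by
  induction path with
  | nil => rfl
  | cons r rest ih =>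
      obtain ⟨x, xs, rfl⟩ : ∃ x xs, r = x :: xs := by
        cases r with
        | nil => exact absurd rfl (hne _ List.mem_cons_self)
        | cons a l => exact ⟨_, _, rfl⟩
      simp only [List.length_cons, List.replicate_succ, pvG,
        ih (fun y hy => hne y (List.mem_cons_of_mem _ hy)), pvS_cons]
      simp only [Int.toNat_zero, Nat.zero_add, List.drop_one, List.getD_cons_zero, List.tail_cons]
      rw [pvRowMax_shift]
      rfl

theorem pvCarry_cons (r : List Int) (rest : List (List Int)) (j : Int) (k : Nat) :
    ∀ (ri : List Int),
    pvCarry (r :: rest) (j :: ri) (k + 1) =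
      match pvCarry rest ri k with
      | some ri' => some (j :: ri')
      | none => if (PySem.List.pyGet? r (j + 1)).isSome then some ((j + 1) :: pvZ ri k) else none := by
  induction k with
  | zero =>
      intro ri
      simp [pvCarry, pvZ, PySem.List.pySetD_of_nonneg]
  | succ k ih =>
      intro ri
      conv_lhs => rw [pvCarry]
      conv_rhs => rw [pvCarry]
      simp only [PySem.List.pyGetD_natCast, PySem.List.pySetD_natCast, List.getD_cons_succ,
        List.set_cons_succ]
      split
      · rfl
      · rw [ih (ri.set k 0)]
        rw [show pvZ ri (k+1) = pvZ (ri.set k 0) k from rfl]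

theorem pvCarry_step (path : List (List Int)) : ∀ (idxs : List Int),
    (∀ r ∈ path, r ≠ []) → pvValid path idxs →
    (pvCarry path idxs path.length = none →
        pvCount path idxs = 1 ∧ pvG path idxs = pvSumAt path idxs)
    ∧ (∀ next, pvCarry path idxs path.length = some next →
        pvValid path next ∧ pvCount path next + 1 = pvCount path idxs
          ∧ pvG path idxs = max (pvSumAt path idxs) (pvG path next)) := by
  induction path with
  | nil =>
      intro idxs _ hv
      cases idxs with
      | nil => exact ⟨fun _ => ⟨rfl, rfl⟩, fun next h => by simp [pvCarry] at h⟩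
      | cons j ri => exact hv.elim
  | cons r rest ih =>
      intro idxs hne hv
      cases idxs with
      | nil => exact hv.elim
      | cons j ri =>
          obtain ⟨hj0, hjlt, hvr⟩ := hv
          have hnerest : ∀ x ∈ rest, x ≠ [] := fun x hx => hne x (List.mem_cons_of_mem _ hx)
          have hlen : ri.length = rest.length := pvValid_length hvr
          have ihr := ih ri hnerest hvr
          rw [show (r :: rest).length = rest.length + 1 from rfl, pvCarry_cons]
          cases hc : pvCarry rest ri rest.length with
          | some ri' =>
              obtain ⟨hv', hcnt, hG⟩ := ihr.2 ri' hc
              refine ⟨fun h => by simp at h, ?_⟩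
              rintro next hn
              simp only [Option.some.injEq] at hn
              subst hn
              refine ⟨⟨hj0, hjlt, hv'⟩, ?_, ?_⟩
              · simp only [pvCount]; omega
              · simp only [pvG, pvSumAt, hG, ← max_add_add_left, pvFoldlMax_init]
          | none =>
              obtain ⟨hcnt1, hGs⟩ := ihr.1 hc
              have hj1 : (j + 1).toNat = j.toNat + 1 := by omega
              by_cases hlt : j.toNat + 1 < r.length
              · have hsome : (PySem.List.pyGet? r (j + 1)).isSome = true := by
                  rw [PySem.List.pyGet?_of_nonneg r (show (0 : Int) ≤ j + 1 by omega), hj1]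
                  simp [List.getElem?_eq_getElem (show j.toNat + 1 < r.length from hlt)]
                simp only [hsome, if_true]
                refine ⟨fun h => by simp at h, ?_⟩
                rintro next hn
                simp only [Option.some.injEq] at hn
                subst hn
                have hz : pvZ ri rest.length = List.replicate rest.length 0 := by
                  rw [pvZ_eq ri rest.length hlen.ge, ← hlen]
                  simp
                rw [hz]
                refine ⟨⟨by omega, by omega, pvValid_zeros rest hnerest⟩, ?_, ?_⟩
                · simp only [pvCount, pvCount_zeros rest hnerest, hcnt1, hj1]
                  have hq : r.length - 1 - j.toNat = (r.length - 1 - (j.toNat + 1)) + 1 := by omega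
                  rw [hq, Nat.succ_mul]
                  omega
                · simp only [pvG, pvSumAt, hGs, hj1, pvG_zeros rest hnerest]
                  rw [List.drop_eq_getElem_cons hlt, List.foldl_cons, List.getD_eq_getElem r 0 hlt,
                    pvFoldlMax_init]
              · have hnone : (PySem.List.pyGet? r (j + 1)).isSome = false := by
                  have h := PySem.List.pyGet?_of_nonneg (i := j + 1) r (by omega)
                  rw [h, hj1]
                  simp [List.getElem?_eq_none (show r.length ≤ j.toNat + 1 by omega)]
                simp only [hnone, Bool.false_eq_true, if_false]
                refine ⟨fun _ => ?_, fun next hn => by simp at hn⟩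
                have hdrop : r.drop (j.toNat + 1) = [] := List.drop_of_length_le (by omega)
                constructor
                · simp only [pvCount, hcnt1]
                  have : r.length - 1 - j.toNat = 0 := by omega
                  simp [this]
                · simp [pvG, pvSumAt, hdrop, hGs]

theorem pvTempMax_go (path : List (List Int)) :
    ∀ (cur pre : List Int) (t : Int), pvValid path cur →
    (PySem.List.enumerate path ((pre.length : Int))).foldl
      (fun a p => a + PySem.List.pyGetD p.2 (PySem.List.pyGetD (pre ++ cur) p.1 0) 0) t
    = t + pvSumAt path cur := by
  induction path with
  | nil =>
      intro cur pre t hv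
      cases cur with
      | nil => simp [PySem.List.enumerate_nil, pvSumAt]
      | cons j ri => exact hv.elim
  | cons r rest ih =>
      intro cur pre t hv
      cases cur with
      | nil => exact hv.elim
      | cons j ri =>
          obtain ⟨hj0, hjlt, hvr⟩ := hv
          rw [PySem.List.enumerate_cons]
          simp only [List.foldl_cons]
          have h1 : PySem.List.pyGetD (pre ++ j :: ri) ((pre.length : Int)) 0 = j := by
            rw [PySem.List.pyGetD_natCast]
            simp [List.getD_eq_getElem?_getD]
          have h2 : PySem.List.pyGetD r j 0 = r[j.toNat] :=
            PySem.List.pyGetD_eq_getElem r 0 hj0 (by omega)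
          rw [h1, h2, List.append_cons pre j ri]
          have hcast : ((pre.length : Int) + 1) = (((pre ++ [j]).length : Nat) : Int) := by
            simp
          rw [hcast, ih ri (pre ++ [j]) (t + r[j.toNat]) hvr]
          rw [show pvSumAt (r :: rest) (j :: ri) = r.getD j.toNat 0 + pvSumAt rest ri from rfl,
            List.getD_eq_getElem r 0 hjlt]
          ring

theorem pvTempMax_eq (path : List (List Int)) (idxs : List Int) (hv : pvValid path idxs) :
    pvTempMax path idxs = pvSumAt path idxs := by
  have := pvTempMax_go path idxs [] 0 hv
  simpa [pvTempMax] using this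

theorem pvLoop_eq (path : List (List Int)) (hne : ∀ r ∈ path, r ≠ []) :
    ∀ (fuel : Nat) (idxs : List Int) (mx : Int), pvValid path idxs →
      pvCount path idxs ≤ fuel →
      pvALoop path fuel idxs mx = max mx (pvG path idxs) := by
  intro fuel
  induction fuel with
  | zero =>
      intro idxs mx _ hcnt
      exact absurd hcnt (by have := pvCount_pos path idxs; omega)
  | succ fuel ih =>
      intro idxs mx hv hcnt
      rw [pvALoop]
      simp only [pvTempMax_eq path idxs hv]
      have hmx : (if pvSumAt path idxs > mx then pvSumAt path idxs else mx)
          = max mx (pvSumAt path idxs) := by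
        rw [max_def]; split_ifs <;> omega
      cases hc : pvCarry path idxs path.length with
      | none =>
          obtain ⟨_, hGs⟩ := (pvCarry_step path idxs hne hv).1 hc
          simp only [hmx, hGs]
      | some next =>
          obtain ⟨hv', hcnt', hG⟩ := (pvCarry_step path idxs hne hv).2 next hc
          rw [hmx]
          show pvALoop path fuel next (max mx (pvSumAt path idxs)) = max mx (pvG path idxs)
          rw [ih next _ hv' (by omega), hG, max_assoc]

-- ===== VERDICT (by name: the statement is the Claim_ definition above) =====
theorem findLongestPathJump_spec : Claim_equal_findLongestPathJump := by
  intro path _ hpre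
  unfold Spec_findLongestPathJump findLongestPathJump findLongestPathJump_alt
  have hne := hpre.2
  have hv := pvValid_zeros path hne
  rw [pvLoop_eq path hne _ _ 0 hv (le_of_eq (pvCount_zeros path hne)), pvG_zeros path hne]
  show max 0 (pvS path) = if pvS path > 0 then pvS path else 0
  rw [max_def]; split_ifs <;> omega
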